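-- pv_equiv track=rewrite | github.com/Ga11eaN/goit-python | game/action.py | hidden_map
-- ===== SOURCE A (Python) =====
-- def hidden_map(game_map, char_position):
--     def check_vision(char_position, w,h):
--         if abs(w - char_position[0]) < 3 and abs(h - char_position[1]) < 3:
--             return True
--         else:
--             return False
--
--     hidden_game_up = []
--     for i in range(len(game_map)):
--         hidden_game_up.append([])
--         for j in range(len(game_map[0])):
--             if check_vision(char_position, i, j):
--                 hidden_game_up[i].append(game_map[i][j])
--             else:
--                 hidden_game_up[i].append(' ')
--
--     return hidden_game_up
-- ===== SOURCE B (Python) =====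
-- def hidden_map(game_map, char_position):
--     rows = len(game_map)
--     if rows == 0:
--         return []
--     cols = len(game_map[0])
--     out = [[' '] * cols for _ in range(rows)]
--     r, c = char_position
--     for i in range(max(0, r - 2), min(rows - 1, r + 2) + 1):
--         for j in range(max(0, c - 2), min(cols - 1, c + 2) + 1):
--             out[i][j] = game_map[i][j]
--     return out
-- ===== Notes on version B (the rewrite author's own statement) =====
-- stated objective: faster
-- what changed: A scans every cell of the grid and tests the visibility predicate per cell; B fills a whole grid of spaces and then overwrites only the clamped 5x5 window around the character, so the per-cell predicate scan disappears.
import Mathlib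
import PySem

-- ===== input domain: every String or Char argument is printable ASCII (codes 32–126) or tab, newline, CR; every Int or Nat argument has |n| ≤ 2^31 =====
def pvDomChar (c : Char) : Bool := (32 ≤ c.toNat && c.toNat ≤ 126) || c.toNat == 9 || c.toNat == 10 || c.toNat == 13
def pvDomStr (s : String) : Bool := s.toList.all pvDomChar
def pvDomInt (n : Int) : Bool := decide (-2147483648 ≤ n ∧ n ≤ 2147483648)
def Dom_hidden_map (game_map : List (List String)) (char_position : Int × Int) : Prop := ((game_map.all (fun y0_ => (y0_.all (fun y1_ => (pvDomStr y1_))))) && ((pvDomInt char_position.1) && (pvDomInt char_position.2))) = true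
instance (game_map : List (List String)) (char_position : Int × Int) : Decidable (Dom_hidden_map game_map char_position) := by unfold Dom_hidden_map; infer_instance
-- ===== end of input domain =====

-- B fills a full grid of spaces once and then overwrites only the clamped 5x5
-- window around the character, instead of A's per-cell visibility test.

-- ===== PORT A =====
-- A: for each i in range(len(game_map)), for each j in range(len(game_map[0])),
-- append game_map[i][j] if |i - r| < 3 and |j - c| < 3 else ' '.
def hidden_map (game_map : List (List String)) (char_position : Int × Int) : List (List String) :=
  (List.range game_map.length).map (fun (i : Nat) =>
    (List.range (game_map.headD []).length).map (fun (j : Nat) =>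
      if |(i : Int) - char_position.1| < 3 ∧ |((j : Int)) - char_position.2| < 3 then
        (game_map.getD i []).getD j " "
      else " "))

-- ===== PORT B =====
-- B: grid of spaces, then overwrite the clamped window cells.
def hidden_map_alt (game_map : List (List String)) (char_position : Int × Int) : List (List String) :=
  if game_map.length = 0 then []
  else
    let rows : Int := game_map.length
    let cols : Int := (game_map.headD []).length
    let base := List.replicate game_map.length (List.replicate (game_map.headD []).length " ")
    let is := PySem.List.pyRange (max 0 (char_position.1 - 2)) (min (rows - 1) (char_position.1 + 2) + 1) 1
    let js := PySem.List.pyRange (max 0 (char_position.2 - 2)) (min (cols - 1) (char_position.2 + 2) + 1) 1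
    is.foldl (fun grid i =>
      grid.modify i.toNat (fun row =>
        js.foldl (fun r j => r.set j.toNat ((game_map.getD i.toNat []).getD j.toNat " ")) row)) base

-- ===== PRECONDITION & SPEC =====
-- Pre_ excludes exactly the ragged maps on which Python A raises IndexError
-- (a visible window cell (i, j) with j beyond the length of row i); B raises there too.
def Pre_hidden_map (game_map : List (List String)) (char_position : Int × Int) : Prop :=
  ∀ i < game_map.length, ∀ j < (game_map.headD []).length,
    (|(i : Int) - char_position.1| < 3 ∧ |(j : Int) - char_position.2| < 3) →
      j < (game_map.getD i []).length
instance (game_map : List (List String)) (char_position : Int × Int) : Decidable (Pre_hidden_map game_map char_position) := by unfold Pre_hidden_map; infer_instance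

def pvWitness_hidden_map : List (List String) × (Int × Int) := ([["a", "b"], ["c", "d"]], (0, 1))

def Spec_hidden_map (game_map : List (List String)) (char_position : Int × Int) (out : List (List String)) : Prop := out = hidden_map_alt game_map char_position
instance (game_map : List (List String)) (char_position : Int × Int) (out : List (List String)) : Decidable (Spec_hidden_map game_map char_position out) := by unfold Spec_hidden_map; infer_instance

-- ===== CLAIM (what is proved, stated in full; the proofs are below) =====
def Claim_equal_hidden_map : Prop := ∀ (game_map : List (List String)) (char_position : Int × Int), Dom_hidden_map game_map char_position → Pre_hidden_map game_map char_position → Spec_hidden_map game_map char_position (hidden_map game_map char_position)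

-- ===== LEMMAS AND PROOFS =====

-- Inner loop: folding `set j (f j)` over a list of indices.
theorem foldl_set_length (js : List Nat) (f : Nat → String) (row : List String) :
    (js.foldl (fun r j => r.set j (f j)) row).length = row.length := by
  induction js generalizing row with
  | nil => rfl
  | cons j js ih => simp [List.foldl, ih]

theorem foldl_set_getD (js : List Nat) (f : Nat → String) (k : Nat) :
    ∀ (row : List String), k < row.length →
    (js.foldl (fun r j => r.set j (f j)) row).getD k " "
      = if k ∈ js then f k else row.getD k " " := by
  induction js with
  | nil => intro row hk; simp
  | cons j js ih =>
    intro row hk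
    have hk' : k < (row.set j (f j)).length := by simpa using hk
    rw [List.foldl_cons, ih _ hk']
    by_cases hmem : k ∈ js
    · simp [hmem]
    · by_cases hkj : k = j
      · subst hkj
        simp [hmem, List.getD_eq_getElem?_getD, hk]
      · simp [hmem, hkj, List.getD_eq_getElem?_getD, List.getElem?_set_ne (fun h => hkj h.symm)]

-- Outer loop: folding `modify i (g i)` over distinct indices.
theorem foldl_modify_length (is : List Nat) (g : Nat → List String → List String)
    (grid : List (List String)) :
    (is.foldl (fun gr i => gr.modify i (g i)) grid).length = grid.length := by
  induction is generalizing grid with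
  | nil => rfl
  | cons i is ih => simp [List.foldl, ih]

theorem foldl_modify_getD (is : List Nat) (g : Nat → List String → List String)
    (k : Nat) :
    ∀ (grid : List (List String)), is.Nodup → k < grid.length →
    (is.foldl (fun gr i => gr.modify i (g i)) grid).getD k []
      = if k ∈ is then g k (grid.getD k []) else grid.getD k [] := by
  induction is with
  | nil => intro grid _ _; simp
  | cons i is ih =>
    intro grid hnd hk
    have hnotin : i ∉ is := (List.nodup_cons.mp hnd).1
    have hnd' : is.Nodup := (List.nodup_cons.mp hnd).2
    have hk' : k < (grid.modify i (g i)).length := by simpa using hk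
    rw [List.foldl_cons, ih _ hnd' hk']
    by_cases hmem : k ∈ is
    · have hki : k ≠ i := fun h => hnotin (h ▸ hmem)
      simp [hmem, List.getD_eq_getElem?_getD, Ne.symm hki]
    · by_cases hki : k = i
      · subst hki
        simp [hmem, List.getD_eq_getElem?_getD, hk]
      · have hik : ¬ i = k := fun h => hki h.symm
        simp [hmem, hik, List.getD_eq_getElem?_getD]
        intro h
        exact absurd h hki

-- Membership of a Nat in the toNat image of a nonnegative unit-step pyRange.
theorem mem_map_toNat_pyRange (a b : Int) (ha : 0 ≤ a) (k : Nat) :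
    (k ∈ (PySem.List.pyRange a b 1).map Int.toNat) ↔ (a ≤ (k : Int) ∧ (k : Int) < b) := by
  constructor
  · rintro hmem
    rcases List.mem_map.mp hmem with ⟨x, hx, hxe⟩
    have hx' := (PySem.List.mem_pyRange_one).mp hx
    have h0x : 0 ≤ x := le_trans ha hx'.1
    have : (k : Int) = x := by rw [← hxe]; exact Int.toNat_of_nonneg h0x
    omega
  · rintro ⟨h1, h2⟩
    exact List.mem_map.mpr ⟨(k : Int), (PySem.List.mem_pyRange_one).mpr ⟨h1, h2⟩, Int.toNat_natCast k⟩

theorem nodup_map_toNat_pyRange (a b : Int) (ha : 0 ≤ a) :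
    ((PySem.List.pyRange a b 1).map Int.toNat).Nodup := by
  apply List.Nodup.map_on _ (PySem.List.nodup_pyRange_one a b)
  intro x hx y hy hxy
  have hx' := (PySem.List.mem_pyRange_one).mp hx
  have hy' := (PySem.List.mem_pyRange_one).mp hy
  omega

-- ===== VERDICT (by name: the statement is the Claim_ definition above) =====
theorem hidden_map_spec : Claim_equal_hidden_map := by
  intro gm cp _hdom _hpre
  unfold Spec_hidden_map hidden_map hidden_map_alt
  by_cases hnil : gm.length = 0
  · simp [hnil]
  · simp only [hnil, if_false]
    set cols := (gm.headD []).length with hcols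
    set li : Int := max 0 (cp.1 - 2) with hli
    set hi : Int := min ((gm.length : Int) - 1) (cp.1 + 2) + 1 with hhi
    set lj : Int := max 0 (cp.2 - 2) with hlj
    set hj : Int := min ((cols : Int) - 1) (cp.2 + 2) + 1 with hhj
    -- rewrite the Int folds as Nat folds over toNat images
    have houter :
        (PySem.List.pyRange li hi 1).foldl
          (fun grid i => grid.modify i.toNat (fun row =>
            (PySem.List.pyRange lj hj 1).foldl
              (fun r j => r.set j.toNat ((gm.getD i.toNat []).getD j.toNat " ")) row))
          (List.replicate gm.length (List.replicate cols " "))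
        = ((PySem.List.pyRange li hi 1).map Int.toNat).foldl
            (fun grid i => grid.modify i (fun row =>
              ((PySem.List.pyRange lj hj 1).map Int.toNat).foldl
                (fun r j => r.set j ((gm.getD i []).getD j " ")) row))
            (List.replicate gm.length (List.replicate cols " ")) := by
      rw [List.foldl_map]
      congr 1
      funext grid i
      congr 1
      funext row
      rw [List.foldl_map]
    rw [houter]
    have hla : 0 ≤ li := le_max_left 0 _
    have hlb : 0 ≤ lj := le_max_left 0 _
    apply List.ext_getElem
    · simp [foldl_modify_length]
    · intro k hk1 hk2
      simp only [List.length_map, List.length_range] at hk1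
      have hkg : k < (List.replicate gm.length (List.replicate cols " ")).length := by
        simpa using hk1
      have hrow := foldl_modify_getD ((PySem.List.pyRange li hi 1).map Int.toNat)
        (fun i row => ((PySem.List.pyRange lj hj 1).map Int.toNat).foldl
            (fun r j => r.set j ((gm.getD i []).getD j " ")) row) k
        (List.replicate gm.length (List.replicate cols " "))
        (nodup_map_toNat_pyRange li hi hla) hkg
      have hGetD : ∀ (xs : List (List String)) (h : k < xs.length), xs[k] = xs.getD k [] := by
        intro xs h
        simp [List.getD_eq_getElem?_getD, List.getElem?_eq_getElem h]
      rw [hGetD _ hk2, hrow]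
      have hbase : (List.replicate gm.length (List.replicate cols " ")).getD k []
          = List.replicate cols " " := by
        simp [List.getD_eq_getElem?_getD, List.getElem?_replicate, hk1]
      rw [hbase]
      by_cases hkin : k ∈ (PySem.List.pyRange li hi 1).map Int.toNat
      · simp only [if_pos hkin]
        have hkw := (mem_map_toNat_pyRange li hi hla k).mp hkin
        apply List.ext_getElem
        · simp [foldl_set_length]
        · intro m hm1 hm2
          simp only [List.length_map, List.length_range] at hm1
          have hmr : m < (List.replicate cols " ").length := by simpa using hm1
          have hcell := foldl_set_getD ((PySem.List.pyRange lj hj 1).map Int.toNat)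
            (fun j => (gm.getD k []).getD j " ") m (List.replicate cols " ") hmr
          have hGetD' : ∀ (xs : List String) (h : m < xs.length), xs[m] = xs.getD m " " := by
            intro xs h
            simp [List.getD_eq_getElem?_getD, List.getElem?_eq_getElem h]
          rw [hGetD' _ hm2, hcell]
          by_cases hmin : m ∈ (PySem.List.pyRange lj hj 1).map Int.toNat
          · have hmw := (mem_map_toNat_pyRange lj hj hlb m).mp hmin
            have hvis : |(k : Int) - cp.1| < 3 ∧ |(m : Int) - cp.2| < 3 :=
              ⟨abs_lt.mpr (by omega), abs_lt.mpr (by omega)⟩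
            simp [List.getElem_map, List.getElem_range, hvis, hmin]
          · have hmc : m < cols := by simpa using hmr
            have hnvis : ¬ (|(k : Int) - cp.1| < 3 ∧ |(m : Int) - cp.2| < 3) := by
              intro hvis
              apply hmin
              apply (mem_map_toNat_pyRange lj hj hlb m).mpr
              simp only [abs_lt] at hvis
              omega
            simp [List.getElem_map, List.getElem_range, hnvis, hmin,
              List.getD_eq_getElem?_getD, List.getElem?_replicate, hmc]
      · have hkc : k < gm.length := by simpa using hkg
        have hnrow : ∀ m, m < cols → ¬ (|(k : Int) - cp.1| < 3 ∧ |(m : Int) - cp.2| < 3) := by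
          intro m hm hvis
          apply hkin
          apply (mem_map_toNat_pyRange li hi hla k).mpr
          simp only [abs_lt] at hvis
          omega
        simp only [if_neg hkin]
        apply List.ext_getElem
        · simp
        · intro m hm1 hm2
          have hmc : m < cols := by simpa using hm2
          simp [List.getElem_map, List.getElem_range]
          intro h1 h2
          exact absurd ⟨h1, h2⟩ (hnrow m hmc)
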